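-- pv_equiv track=rewrite | github.com/jbasko/katas | katas2020/kata01.py | longest_monotonous_substring
-- ===== SOURCE A (Python) =====
-- def longest_monotonous_substring(s):
--     length = len(s)
--     if length < 2:
--         return length
--
--     longest, curr_incr, curr_decr = 0, 0, 0
--
--     for i in range(0, length):
--         if int(s[i]) == int(s[i - 1]):
--             curr_incr += 1
--             curr_decr += 1
--         elif int(s[i]) < int(s[i-1]):
--             curr_incr = 1
--             curr_decr += 1
--         else:
--             curr_incr += 1
--             curr_decr = 1
--         longest = max(longest, curr_incr, curr_decr)
--
--     return longest
-- ===== SOURCE B (Python) =====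
-- def longest_monotonous_substring(s):
--     if len(s) < 2:
--         return len(s)
--     ds = [int(c) for c in s]
--
--     def longest_run(ok):
--         best, cur, prev = 1, 1, ds[0]
--         for d in ds[1:]:
--             cur = cur + 1 if ok(d, prev) else 1
--             best = max(best, cur)
--             prev = d
--         return best
--
--     return max(longest_run(lambda d, p: d >= p),
--                longest_run(lambda d, p: d <= p))
-- ===== Notes on version B (the rewrite author's own statement) =====
-- stated objective: simpler
-- what changed: Replaces the single pass with paired incr/decr counters and the modular s[i-1] wraparound by converting to digits once and running two plain single-relation run scans (longest non-decreasing run, longest non-increasing run), returning their maximum.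
import Mathlib
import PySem

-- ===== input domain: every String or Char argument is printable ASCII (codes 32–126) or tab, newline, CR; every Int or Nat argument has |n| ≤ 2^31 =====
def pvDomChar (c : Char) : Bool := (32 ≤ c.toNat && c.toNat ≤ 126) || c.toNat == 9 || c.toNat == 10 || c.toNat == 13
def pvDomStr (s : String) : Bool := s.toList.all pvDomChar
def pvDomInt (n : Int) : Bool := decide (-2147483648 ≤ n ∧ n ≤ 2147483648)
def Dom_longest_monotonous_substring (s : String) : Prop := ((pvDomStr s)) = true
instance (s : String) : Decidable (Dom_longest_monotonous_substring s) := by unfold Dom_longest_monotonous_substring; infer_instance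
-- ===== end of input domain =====

-- B replaces A's single pass with paired incr/decr counters (and the inert s[i-1] wraparound at i=0)
-- by one digit-conversion pass followed by two single-relation run scans whose maxima are combined.


-- ===== PORT A =====
-- int(s[i]) for an in-range index; the .getD 0 is never reached under Pre_ (all chars digits there)
def pvDig (s : String) (i : Int) : Int :=
  ((PySem.Str.pyGet? s i).bind (fun c => PySem.Int.ofChars? [c])).getD 0

-- the body of A's for-loop: state (longest, curr_incr, curr_decr), a = int(s[i]), b = int(s[i-1])
def pvStepA (st : Int × Int × Int) (a b : Int) : Int × Int × Int :=
  if a = b then (max (max st.1 (st.2.1 + 1)) (st.2.2 + 1), st.2.1 + 1, st.2.2 + 1)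
  else if a < b then (max (max st.1 1) (st.2.2 + 1), 1, st.2.2 + 1)
  else (max (max st.1 (st.2.1 + 1)) 1, st.2.1 + 1, 1)

def longest_monotonous_substring (s : String) : Int :=
  let length := PySem.Str.len s
  if length < 2 then length
  else
    ((PySem.List.pyRange 0 length 1).foldl
      (fun st i => pvStepA st (pvDig s i) (pvDig s (i - 1))) (0, 0, 0)).1

-- ===== PORT B =====
-- int(c) for one character
def pvConv (c : Char) : Int := (PySem.Int.ofChars? [c]).getD 0

-- the body of B's for-loop: state (best, cur, prev)
def pvStepB (ok : Int → Int → Bool) (st : Int × Int × Int) (d : Int) : Int × Int × Int :=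
  let cur := if ok d st.2.2 then st.2.1 + 1 else 1
  (max st.1 cur, cur, d)

def pvLongestRun (ok : Int → Int → Bool) (d0 : Int) (rest : List Int) : Int :=
  (rest.foldl (pvStepB ok) (1, 1, d0)).1

def longest_monotonous_substring_alt (s : String) : Int :=
  if PySem.Str.len s < 2 then PySem.Str.len s
  else
    match s.toList.map pvConv with
    | [] => 0   -- unreachable: len s ≥ 2
    | d :: rest => max (pvLongestRun (fun d p => d ≥ p) d rest)
                       (pvLongestRun (fun d p => d ≤ p) d rest)

-- ===== PRECONDITION & SPEC =====
-- Pre_ excludes exactly the strings on which Python A raises ValueError: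
-- length ≥ 2 with a non-digit character (int(s[i]) fails there; B raises identically).
def Pre_longest_monotonous_substring (s : String) : Prop :=
  s.toList.length < 2 ∨ s.toList.all Char.isDigit
instance (s : String) : Decidable (Pre_longest_monotonous_substring s) := by
  unfold Pre_longest_monotonous_substring; infer_instance

def pvWitness_longest_monotonous_substring : String := "421137"

def Spec_longest_monotonous_substring (s : String) (out : Int) : Prop := out = longest_monotonous_substring_alt s
instance (s : String) (out : Int) : Decidable (Spec_longest_monotonous_substring s out) := by unfold Spec_longest_monotonous_substring; infer_instance

-- ===== CLAIM (what is proved, stated in full; the proofs are below) =====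
def Claim_equal_longest_monotonous_substring : Prop := ∀ (s : String), Dom_longest_monotonous_substring s → Pre_longest_monotonous_substring s → Spec_longest_monotonous_substring s (longest_monotonous_substring s)

-- ===== LEMMAS AND PROOFS =====

-- A's walk over the digit list, prev threaded through
def pvWalkA : Int → (Int × Int × Int) → List Int → (Int × Int × Int)
  | _, st, [] => st
  | p, st, d :: rest => pvWalkA d (pvStepA st d p) rest

lemma pvDig_in_range (pre : List Char) (c : Char) (rest : List Char) (s : String)
    (hs : s.toList = pre ++ c :: rest) :
    pvDig s (pre.length : Int) = pvConv c := by
  simp [pvDig, pvConv, hs]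

lemma pvStepA_init (a b : Int) : pvStepA (0, 0, 0) a b = (1, 1, 1) := by
  unfold pvStepA; split_ifs <;> simp

lemma foldA_eq_walk (s : String) :
    ∀ (rest pre : List Char) (p : Char) (st : Int × Int × Int),
    s.toList = pre ++ p :: rest →
    (PySem.List.pyRange ((pre.length : Int) + 1) ((pre.length : Int) + 1 + rest.length) 1).foldl
      (fun st i => pvStepA st (pvDig s i) (pvDig s (i - 1))) st
    = pvWalkA (pvConv p) st (rest.map pvConv) := by
  intro rest
  induction rest with
  | nil =>
    intro pre p st _
    simp [PySem.List.pyRange_one_eq_nil, pvWalkA]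
  | cons d rest' ih =>
    intro pre p st hs
    rw [PySem.List.pyRange_one_cons (by simp only [List.length_cons]; push_cast; omega)]
    rw [List.foldl_cons]
    have h1 : pvDig s ((pre.length : Int) + 1) = pvConv d := by
      have := pvDig_in_range (pre ++ [p]) d rest' s (by simpa using hs)
      simpa using this
    have h2 : pvDig s ((pre.length : Int) + 1 - 1) = pvConv p := by
      have := pvDig_in_range pre p (d :: rest') s hs
      simpa using this
    rw [h1, h2]
    have hrec := ih (pre ++ [p]) d (pvStepA st (pvConv d) (pvConv p)) (by simpa using hs)
    have hlen : ((pre ++ [p]).length : Int) + 1 = (pre.length : Int) + 1 + 1 := by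
      simp
    rw [hlen] at hrec
    have hend : ((pre.length : Int) + 1 + 1 + (rest'.length : Int))
        = (pre.length : Int) + 1 + ((d :: rest').length : Int) := by
      simp only [List.length_cons]; push_cast; ring
    rw [hend] at hrec
    rw [hrec]
    simp [pvWalkA]

lemma walk_eq_two_runs :
    ∀ (l : List Int) (p bi ci bd cd : Int),
    (pvWalkA p (max bi bd, ci, cd) l).1
    = max (l.foldl (pvStepB (fun d q => d ≥ q)) (bi, ci, p)).1
          (l.foldl (pvStepB (fun d q => d ≤ q)) (bd, cd, p)).1 := by
  intro l
  induction l with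
  | nil => intro p bi ci bd cd; simp [pvWalkA]
  | cons d l' ih =>
    intro p bi ci bd cd
    rcases lt_trichotomy d p with h | h | h
    · have e1 : pvStepA (max bi bd, ci, cd) d p = (max (max bi 1) (max bd (cd + 1)), 1, cd + 1) := by
        simp only [pvStepA]
        rw [if_neg (by omega), if_pos h]
        refine Prod.ext ?_ rfl
        simp only
        omega
      have e2 : pvStepB (fun d q => d ≥ q) (bi, ci, p) d = (max bi 1, 1, d) := by
        simp [pvStepB, not_le.mpr h]
      have e3 : pvStepB (fun d q => d ≤ q) (bd, cd, p) d = (max bd (cd + 1), cd + 1, d) := by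
        simp [pvStepB, le_of_lt h]
      simp only [pvWalkA, List.foldl_cons, e1, e2, e3]
      exact ih d (max bi 1) 1 (max bd (cd + 1)) (cd + 1)
    · subst h
      have e1 : pvStepA (max bi bd, ci, cd) d d
          = (max (max bi (ci + 1)) (max bd (cd + 1)), ci + 1, cd + 1) := by
        simp only [pvStepA, if_true]
        refine Prod.ext ?_ rfl
        simp only
        omega
      have e2 : pvStepB (fun d q => d ≥ q) (bi, ci, d) d = (max bi (ci + 1), ci + 1, d) := by
        simp [pvStepB]
      have e3 : pvStepB (fun d q => d ≤ q) (bd, cd, d) d = (max bd (cd + 1), cd + 1, d) := by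
        simp [pvStepB]
      simp only [pvWalkA, List.foldl_cons, e1, e2, e3]
      exact ih d (max bi (ci + 1)) (ci + 1) (max bd (cd + 1)) (cd + 1)
    · have e1 : pvStepA (max bi bd, ci, cd) d p = (max (max bi (ci + 1)) (max bd 1), ci + 1, 1) := by
        simp only [pvStepA]
        rw [if_neg (by omega), if_neg (by omega)]
        refine Prod.ext ?_ rfl
        simp only
        omega
      have e2 : pvStepB (fun d q => d ≥ q) (bi, ci, p) d = (max bi (ci + 1), ci + 1, d) := by
        simp [pvStepB, le_of_lt h]
      have e3 : pvStepB (fun d q => d ≤ q) (bd, cd, p) d = (max bd 1, 1, d) := by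
        simp [pvStepB, not_le.mpr h]
      simp only [pvWalkA, List.foldl_cons, e1, e2, e3]
      exact ih d (max bi (ci + 1)) (ci + 1) (max bd 1) 1

-- ===== VERDICT (by name: the statement is the Claim_ definition above) =====
theorem longest_monotonous_substring_spec : Claim_equal_longest_monotonous_substring := by
  intro s _ _
  unfold Spec_longest_monotonous_substring
  unfold longest_monotonous_substring longest_monotonous_substring_alt
  by_cases hlen : PySem.Str.len s < 2
  · have h1 : s.length ≤ 1 := by
      rw [PySem.Str.len_eq] at hlen
      have h2 : s.toList.length = s.length := by simp
      omega
    simp [h1]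
  · simp only [hlen, if_false]
    have hn : 2 ≤ s.toList.length := by
      rw [PySem.Str.len_eq] at hlen
      have h2 : s.toList.length = s.length := by simp
      omega
    obtain ⟨c0, ctail, hcs⟩ : ∃ c0 ctail, s.toList = c0 :: ctail := by
      cases h : s.toList with
      | nil => rw [h] at hn; simp at hn
      | cons a l => exact ⟨a, l, rfl⟩
    have hlenS : PySem.Str.len s = (ctail.length : Int) + 1 := by
      simp [PySem.Str.len_eq, hcs]
    rw [hlenS]
    have h0 : (0 : Int) < (ctail.length : Int) + 1 := by omega
    rw [PySem.List.pyRange_one_cons h0, List.foldl_cons]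
    have hfirst : pvStepA (0, 0, 0) (pvDig s 0) (pvDig s (0 - 1)) = (1, 1, 1) :=
      pvStepA_init _ _
    rw [hfirst]
    have hA := foldA_eq_walk s ctail [] c0 (1, 1, 1) (by simpa using hcs)
    simp only [List.length_nil, Nat.cast_zero, zero_add] at hA
    rw [add_comm 1 (ctail.length : Int)] at hA
    rw [zero_add, hA, hcs]
    simp only [List.map_cons]
    have := walk_eq_two_runs (ctail.map pvConv) (pvConv c0) 1 1 1 1
    simp only [max_self] at this
    rw [this]
    simp [pvLongestRun]
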